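-- pv_equiv track=rewrite | github.com/soyeong125/Algorithm | Programmers/완전탐색_모음사전.py | solution
-- ===== SOURCE A (Python) =====
-- def solution(word):
--     answer = 0
--     words = 'AEIOU'
--     word_list = []
--     def dfs(cnt,w):
--         if cnt == 5:
--             return
--         for i in range(len(words)):
--             word_list.append(w+words[i])
--             dfs(cnt+1,w+words[i])
--     dfs(0,"")
--     # for i in range(len(word_list)):
--     #     if word_list[i] == word:
--     #         return i+1
--     return word_list.index(word) + 1
-- ===== SOURCE B (Python) =====
-- def solution(word):
--     if not (1 <= len(word) <= 5):
--         raise ValueError(f"{word!r} is not in the vowel dictionary")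
--     total = 0
--     for i, c in enumerate(word):
--         total += 'AEIOU'.index(c) * ((5 ** (5 - i) - 1) // 4) + 1
--     return total
-- ===== Notes on version B (the rewrite author's own statement) =====
-- stated objective: faster
-- what changed: Instead of DFS-enumerating all 3905 vowel words and scanning for the given word with list.index, B computes the 1-based rank arithmetically in one pass over the word's letters (positional number system with block sizes 1, 6, 31, 156, 781).
import Mathlib
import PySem

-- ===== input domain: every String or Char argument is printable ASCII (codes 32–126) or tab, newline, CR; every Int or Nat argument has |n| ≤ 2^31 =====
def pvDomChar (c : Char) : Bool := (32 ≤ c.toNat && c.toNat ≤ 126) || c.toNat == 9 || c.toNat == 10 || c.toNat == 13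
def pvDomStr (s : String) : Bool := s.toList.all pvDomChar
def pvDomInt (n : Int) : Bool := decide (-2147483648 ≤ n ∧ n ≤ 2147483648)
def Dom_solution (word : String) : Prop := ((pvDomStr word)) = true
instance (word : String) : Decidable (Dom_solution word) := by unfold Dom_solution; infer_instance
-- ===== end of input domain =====

-- B replaces A's exhaustive DFS dictionary + list.index scan by a direct arithmetic rank
-- computation over the word's letters (objective: faster, in a timing run's measurement).

-- ===== PORT A =====
-- A's dfs(cnt, w): recursion written on fuel 5 - cnt (the only reachable cnts are 0..5,
-- and the 'cnt == 5: return' test is exactly 'fuel = 0').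
def dfsA : Nat → List Char → List (List Char)
  | 0, _ => []
  | d + 1, w => ("AEIOU".toList).flatMap (fun c => (w ++ [c]) :: dfsA d (w ++ [c]))

def solution (word : String) : Int :=
  match PySem.List.index? (dfsA 5 []) word.toList with
  | some k => (k : Int) + 1
  | none => 0   -- word not in word_list: Python's list.index raises ValueError (excluded by Pre_)

-- ===== PORT B =====
def solution_alt (word : String) : Int :=
  if 1 ≤ word.toList.length ∧ word.toList.length ≤ 5 then
    -- the 'if' guard is Source B's explicit ValueError for empty/overlong words (excluded by Pre_);
    -- the vowel-alphabet .index(c) raising on a foreign letter is index?'s none, defaulted (excluded by Pre_);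
    -- (5 - ic.1).toNat is exact for Python's 5**(5-i): inside Pre_ every index i satisfies 0 ≤ i ≤ 4.
    (PySem.List.enumerate word.toList 0).foldl
      (fun total ic =>
        total + (((PySem.List.index? ("AEIOU".toList) ic.2).getD 0 : Nat) : Int) *
          PySem.Int.floordiv ((5 : Int) ^ (5 - ic.1).toNat - 1) 4 + 1)
      0
  else 0

-- ===== PRECONDITION & SPEC =====
-- Pre_ excludes exactly the inputs on which A's list.index raises ValueError: the empty word,
-- words longer than 5, and words containing a non-vowel letter (B raises ValueError there too).
def Pre_solution (word : String) : Prop :=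
  word.toList ≠ [] ∧ word.toList.length ≤ 5 ∧
    word.toList.all (fun c => "AEIOU".toList.contains c) = true
instance (word : String) : Decidable (Pre_solution word) := by unfold Pre_solution; infer_instance
def pvWitness_solution : String := "EIO"

def Spec_solution (word : String) (out : Int) : Prop := out = solution_alt word
instance (word : String) (out : Int) : Decidable (Spec_solution word out) := by unfold Spec_solution; infer_instance

-- ===== CLAIM (what is proved, stated in full; the proofs are below) =====
def Claim_equal_solution : Prop := ∀ (word : String), Dom_solution word → Pre_solution word → Spec_solution word (solution word)

-- ===== LEMMAS AND PROOFS =====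

-- block size at remaining depth e: Lb e = 1 + |dfsA e w| = 1 + 5 + 25 + ... + 5^e
def Lb : Nat → Nat
  | 0 => 1
  | e + 1 => 1 + 5 * Lb e

-- 0-based index of a valid word u in dfsA d w (prefixed by w), d ≥ |u| ≥ 1
def nrank : List Char → Nat → Nat
  | [], _ => 0
  | _ :: _, 0 => 0
  | c :: u, e + 1 =>
      (PySem.List.index? "AEIOU".toList c).getD 0 * Lb e +
        (if u = [] then 0 else 1 + nrank u e)

theorem four_mul_Lb (e : Nat) : 4 * Lb e + 1 = 5 ^ (e + 1) := by
  induction e with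
  | zero => simp [Lb]
  | succ e ih => rw [pow_succ, ← ih]; simp [Lb]; ring

theorem length_dfsA (d : Nat) : ∀ w : List Char, (dfsA d w).length + 1 = Lb d := by
  induction d with
  | zero => intro w; simp [dfsA, Lb]
  | succ d ih =>
    intro w
    have hA : ("AEIOU".toList) = ['A', 'E', 'I', 'O', 'U'] := by decide
    simp only [dfsA, hA, List.flatMap_cons, List.flatMap_nil, List.append_nil,
      List.length_append, List.length_cons, Lb]
    have h1 := ih (w ++ ['A']); have h2 := ih (w ++ ['E']); have h3 := ih (w ++ ['I'])
    have h4 := ih (w ++ ['O']); have h5 := ih (w ++ ['U'])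
    omega

theorem mem_dfsA (d : Nat) : ∀ (w x : List Char), x ∈ dfsA d w → ∃ c t, x = w ++ c :: t := by
  induction d with
  | zero => intro w x h; simp [dfsA] at h
  | succ d ih =>
    intro w x h
    simp only [dfsA, List.mem_flatMap, List.mem_cons] at h
    obtain ⟨c, _, h | h⟩ := h
    · exact ⟨c, [], by simp [h]⟩
    · obtain ⟨c', t, rfl⟩ := ih (w ++ [c]) x h
      exact ⟨c, c' :: t, by simp⟩

theorem target_not_mem_block {c c' : Char} (hne : c ≠ c') (e : Nat) (w u : List Char) :
    (w ++ c :: u) ∉ ((w ++ [c']) :: dfsA e (w ++ [c'])) := by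
  intro h
  rcases List.mem_cons.mp h with h | h
  · have := List.append_cancel_left h
    simp at this; exact hne this.1
  · obtain ⟨c'', t, hx⟩ := mem_dfsA e (w ++ [c']) _ h
    rw [List.append_assoc] at hx
    have := List.append_cancel_left hx
    simp at this; exact hne this.1

theorem index?_append_of_not_mem {α : Type} [BEq α] [LawfulBEq α] {v : α} :
    ∀ {l : List α} (t : List α), v ∉ l →
      PySem.List.index? (l ++ t) v = (PySem.List.index? t v).map (· + l.length) := by
  intro l
  induction l with
  | nil => intro t _; simp [Option.map_id']
  | cons x l ih =>
    intro t h
    simp only [List.mem_cons, not_or] at h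
    have hxv : x ≠ v := fun hv => h.1 hv.symm
    rw [List.cons_append, PySem.List.index?_cons_of_ne (l ++ t) hxv, ih t h.2]
    cases PySem.List.index? t v <;> simp
    omega

-- skipping one non-matching letter block
theorem skip_block {c c' : Char} (hne : c ≠ c') (e : Nat) (w u : List Char) (rest : List (List Char)) :
    PySem.List.index? ((((w ++ [c']) :: dfsA e (w ++ [c'])) : List (List Char)) ++ rest) (w ++ c :: u)
      = (PySem.List.index? rest (w ++ c :: u)).map (· + Lb e) := by
  rw [index?_append_of_not_mem rest (target_not_mem_block hne e w u)]
  have := length_dfsA e (w ++ [c'])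
  simp only [List.length_cons]
  rw [this]

-- the matching letter block: head if the word ends here, else 1 + recursive index
theorem hit_block {c : Char} (e : Nat) (w u : List Char) (rest : List (List Char))
    (hu : u = [] ∨ PySem.List.index? (dfsA e (w ++ [c])) ((w ++ [c]) ++ u) = some (nrank u e)) :
    PySem.List.index? ((((w ++ [c]) :: dfsA e (w ++ [c])) : List (List Char)) ++ rest) (w ++ c :: u)
      = some (if u = [] then 0 else 1 + nrank u e) := by
  rcases hu with rfl | hu
  · simp only [List.cons_append]
    rw [PySem.List.index?_cons_self]
    simp
  · have hmem : (w ++ [c]) ++ u ∈ dfsA e (w ++ [c]) := by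
      have := PySem.List.index?_isSome_iff (xs := dfsA e (w ++ [c])) (v := (w ++ [c]) ++ u)
      rw [hu] at this; simpa using this.mp rfl
    have hne : u ≠ [] := by
      rintro rfl
      obtain ⟨c', t, hx⟩ := mem_dfsA e (w ++ [c]) _ (by simpa using hmem)
      have hlen := congrArg List.length hx
      simp at hlen
    have hform : w ++ c :: u = (w ++ [c]) ++ u := by simp
    rw [List.cons_append, hform,
      PySem.List.index?_cons_of_ne _ (by simp [hne]),
      PySem.List.index?_append_of_mem rest hmem, hu]
    simp only [hne, if_false, Option.map_some, Option.some.injEq]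
    omega

theorem index_dfsA : ∀ (u : List Char) (d : Nat) (w : List Char), u ≠ [] → u.length ≤ d →
    (∀ c ∈ u, c ∈ "AEIOU".toList) →
    PySem.List.index? (dfsA d w) (w ++ u) = some (nrank u d) := by
  intro u
  induction u with
  | nil => intro d w h; exact absurd rfl h
  | cons c u ih =>
    intro d w _ hlen hmem
    obtain ⟨e, rfl⟩ : ∃ e, d = e + 1 := ⟨d - 1, by simp at hlen; omega⟩
    have hc : c ∈ "AEIOU".toList := hmem c (by simp)
    have hu : u = [] ∨ PySem.List.index? (dfsA e (w ++ [c])) ((w ++ [c]) ++ u) = some (nrank u e) := by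
      rcases List.eq_nil_or_concat' u with rfl | ⟨v, a, rfl⟩
      · exact Or.inl rfl
      · refine Or.inr (ih e (w ++ [c]) (by simp) (by simp at hlen ⊢; omega)
          (fun x hx => hmem x (by simp [hx])))
    have hA : ("AEIOU".toList) = ['A', 'E', 'I', 'O', 'U'] := by decide
    simp only [dfsA, hA, List.flatMap_cons, List.flatMap_nil] at *
    simp only [List.mem_cons, List.not_mem_nil, or_false] at hc
    rcases hc with rfl | rfl | rfl | rfl | rfl <;> simp only [nrank]
    · rw [hit_block e w u _ hu]
      have hv : (PySem.List.index? "AEIOU".toList 'A').getD 0 = 0 := by decide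
      rw [hv]; simp only [Option.some.injEq]; split_ifs <;> omega
    · rw [skip_block (by decide) e w u, hit_block e w u _ hu]
      have hv : (PySem.List.index? "AEIOU".toList 'E').getD 0 = 1 := by decide
      rw [hv]; simp only [Option.map_some, Option.some.injEq]; split_ifs <;> omega
    · rw [skip_block (by decide) e w u, skip_block (by decide) e w u, hit_block e w u _ hu]
      have hv : (PySem.List.index? "AEIOU".toList 'I').getD 0 = 2 := by decide
      rw [hv]; simp only [Option.map_some, Option.some.injEq]; split_ifs <;> omega
    · rw [skip_block (by decide) e w u, skip_block (by decide) e w u,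
        skip_block (by decide) e w u, hit_block e w u _ hu]
      have hv : (PySem.List.index? "AEIOU".toList 'O').getD 0 = 3 := by decide
      rw [hv]; simp only [Option.map_some, Option.some.injEq]; split_ifs <;> omega
    · rw [skip_block (by decide) e w u, skip_block (by decide) e w u,
        skip_block (by decide) e w u, skip_block (by decide) e w u, hit_block e w u [] hu]
      have hv : (PySem.List.index? "AEIOU".toList 'U').getD 0 = 4 := by decide
      rw [hv]; simp only [Option.map_some, Option.some.injEq]; split_ifs <;> omega

-- B's loop: fold over the enumerated suffix u starting at position i
theorem foldl_enum : ∀ (u : List Char) (i : Nat) (t : Int), u.length + i ≤ 5 →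
    (PySem.List.enumerate u (i : Int)).foldl
      (fun total ic =>
        total + (((PySem.List.index? ("AEIOU".toList) ic.2).getD 0 : Nat) : Int) *
          PySem.Int.floordiv ((5 : Int) ^ (5 - ic.1).toNat - 1) 4 + 1)
      t
    = t + (if u = [] then 0 else (nrank u (5 - i) : Int) + 1) := by
  intro u
  induction u with
  | nil => intro i t _; simp [PySem.List.enumerate_nil]
  | cons c u ih =>
    intro i t hlen
    have hi : i ≤ 4 := by simp at hlen; omega
    have htoNat : ((5 : Int) - (i : Int)).toNat = (4 - i) + 1 := by omega
    have hfd : PySem.Int.floordiv ((5 : Int) ^ ((5 : Int) - (i : Int)).toNat - 1) 4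
        = (Lb (4 - i) : Int) := by
      rw [htoNat]
      have h4 : 4 * Lb (4 - i) + 1 = 5 ^ ((4 - i) + 1) := four_mul_Lb (4 - i)
      have h4' : (4 : Int) * (Lb (4 - i) : Int) + 1 = (5 : Int) ^ ((4 - i) + 1) := by
        exact_mod_cast h4
      have hcast : (5 : Int) ^ ((4 - i) + 1) - 1 = ((4 * Lb (4 - i) : Nat) : Int) := by
        push_cast; linarith
      rw [hcast]
      rw [show ((4 : Int)) = ((4 : Nat) : Int) from rfl, PySem.Int.floordiv_natCast]
      norm_num
    rw [PySem.List.enumerate_cons]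
    simp only [List.foldl_cons]
    have : ((i : Int) + 1) = (((i + 1 : Nat)) : Int) := by push_cast; ring
    rw [this, ih (i + 1) _ (by simp at hlen ⊢; omega)]
    have h5i : 5 - i = (4 - i) + 1 := by omega
    rw [h5i]
    simp only [nrank, hfd]
    rcases List.eq_nil_or_concat' u with rfl | ⟨v, a, rfl⟩
    · simp
      ring
    · have hne : v ++ [a] ≠ [] := by simp
      have h5i' : 5 - (i + 1) = 4 - i := by omega
      simp only [hne, if_false, h5i']
      push_cast
      ring

-- ===== VERDICT (by name: the statement is the Claim_ definition above) =====
theorem solution_spec : Claim_equal_solution := by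
  intro word _ hpre
  obtain ⟨hne, hlen, hmemb⟩ := hpre
  have hmem : ∀ c ∈ word.toList, c ∈ "AEIOU".toList := by simpa using hmemb
  unfold Spec_solution solution solution_alt
  have h1 : 1 ≤ word.toList.length ∧ word.toList.length ≤ 5 :=
    ⟨by cases h : word.toList with | nil => exact absurd h hne | cons => simp, hlen⟩
  rw [if_pos h1]
  have hidx := index_dfsA word.toList 5 [] hne hlen hmem
  simp only [List.nil_append] at hidx
  rw [hidx]
  rw [show ((0 : Int)) = ((0 : Nat) : Int) from rfl,
    foldl_enum word.toList 0 (((0 : Nat)) : Int) (by omega)]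
  simp [hne]
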